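-- pv_equiv track=rewrite | github.com/Victor-Caus/8Rainhas_genetico | 8Rainhas.py | aptidao
-- ===== SOURCE A (Python) =====
-- def aptidao(cromossomo: list):
--     """
--     Função para calcular a aptidão de um cromossomo, representando o número de colisões entre rainhas.
--
--     Args:
--         cromossomo (list): Lista representando o cromossomo.
--
--     Returns:
--         int: Número de colisões.
--     """
--     colisoes = 0
--     comprimento = len(cromossomo)
--     for i in range(0, comprimento - 1):
--         for j in range(i + 1, comprimento-1):
--             if cromossomo[i] == cromossomo[j]:
--                 colisoes += 1
--
--             if abs(cromossomo[i] - cromossomo[j]) == abs(i - j):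
--                 colisoes += 1
--
--     return colisoes
-- ===== SOURCE B (Python) =====
-- def aptidao(cromossomo: list):
--     """
--     Função para calcular a aptidão de um cromossomo, representando o número de colisões entre rainhas.
--
--     Counts each clashing pair once per shared row and once per shared diagonal,
--     in a single pass with hash counters (preserving A's exclusion of the last position).
--     """
--     rows = {}
--     diag1 = {}
--     diag2 = {}
--     colisoes = 0
--     for i, v in enumerate(cromossomo[:-1]):
--         colisoes += rows.get(v, 0) + diag1.get(v - i, 0) + diag2.get(v + i, 0)
--         rows[v] = rows.get(v, 0) + 1
--         diag1[v - i] = diag1.get(v - i, 0) + 1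
--         diag2[v + i] = diag2.get(v + i, 0) + 1
--     return colisoes
-- ===== Notes on version B (the rewrite author's own statement) =====
-- stated objective: faster
-- what changed: Replaced A's nested O(n^2) all-pairs index scan by a single left-to-right pass that hash-counts values, value-index and value+index diagonals and adds, for each position, the number of earlier matching positions (keeping A's loop bounds, which never pair the last position).
import Mathlib
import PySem

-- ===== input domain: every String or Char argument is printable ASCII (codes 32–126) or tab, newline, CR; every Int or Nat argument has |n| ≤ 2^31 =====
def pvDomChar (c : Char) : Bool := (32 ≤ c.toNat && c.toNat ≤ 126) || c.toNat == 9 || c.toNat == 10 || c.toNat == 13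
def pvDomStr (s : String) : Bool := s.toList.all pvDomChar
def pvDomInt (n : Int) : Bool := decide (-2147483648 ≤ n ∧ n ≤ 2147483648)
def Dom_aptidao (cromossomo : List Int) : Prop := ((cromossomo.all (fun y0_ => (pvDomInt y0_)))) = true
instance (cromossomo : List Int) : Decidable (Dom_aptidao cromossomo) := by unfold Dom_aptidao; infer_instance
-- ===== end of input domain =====

-- B replaces A's nested all-pairs scan by a single pass with three hash counters
-- (rows and the two diagonal families), keeping A's loop bounds (the last position is
-- never paired, exactly as in A's 'range(i + 1, comprimento - 1)').

-- ===== PORT A =====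
def aptidao (cromossomo : List Int) : Int :=
  let comprimento : Int := PySem.List.len cromossomo
  (PySem.List.pyRange 0 (comprimento - 1) 1).foldl (fun colisoes i =>
    (PySem.List.pyRange (i + 1) (comprimento - 1) 1).foldl (fun colisoes j =>
      let colisoes :=
        if PySem.List.pyGetD cromossomo i 0 = PySem.List.pyGetD cromossomo j 0
          then colisoes + 1 else colisoes
      if |PySem.List.pyGetD cromossomo i 0 - PySem.List.pyGetD cromossomo j 0| = |i - j|
        then colisoes + 1 else colisoes) colisoes) 0

-- ===== PORT B =====
-- one iteration of Source B's loop body: state = (rows, diag1, diag2, colisoes), p = (i, v)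
def aptidaoAltStep
    (s : PySem.Dict Int Int × PySem.Dict Int Int × PySem.Dict Int Int × Int)
    (p : Int × Int) :
    PySem.Dict Int Int × PySem.Dict Int Int × PySem.Dict Int Int × Int :=
  let rows := s.1
  let diag1 := s.2.1
  let diag2 := s.2.2.1
  let colisoes := s.2.2.2 + rows.getD p.2 0 + diag1.getD (p.2 - p.1) 0
      + diag2.getD (p.2 + p.1) 0
  (rows.insert p.2 (rows.getD p.2 0 + 1),
   diag1.insert (p.2 - p.1) (diag1.getD (p.2 - p.1) 0 + 1),
   diag2.insert (p.2 + p.1) (diag2.getD (p.2 + p.1) 0 + 1),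
   colisoes)

def aptidao_alt (cromossomo : List Int) : Int :=
  ((PySem.List.enumerate (PySem.List.slice cromossomo none (some (-1))) 0).foldl
    aptidaoAltStep (PySem.Dict.empty, PySem.Dict.empty, PySem.Dict.empty, 0)).2.2.2

-- ===== PRECONDITION & SPEC =====
def Spec_aptidao (cromossomo : List Int) (out : Int) : Prop := out = aptidao_alt cromossomo
instance (cromossomo : List Int) (out : Int) : Decidable (Spec_aptidao cromossomo out) := by unfold Spec_aptidao; infer_instance

-- ===== CLAIM (what is proved, stated in full; the proofs are below) =====
def Claim_equal_aptidao : Prop := ∀ (cromossomo : List Int), Dom_aptidao cromossomo → Spec_aptidao cromossomo (aptidao cromossomo)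

-- ===== LEMMAS AND PROOFS =====

-- per-pair contribution as A computes it (indices i j, values v w)
def pairContribA (i v j w : Int) : Int :=
  (if v = w then 1 else 0) + (if |v - w| = |i - j| then 1 else 0)

-- per-pair contribution as B counts it (entries (index, value); p earlier, q later)
def pairContribB (p q : Int × Int) : Int :=
  (if q.2 = p.2 then 1 else 0) + (if q.2 - q.1 = p.2 - p.1 then 1 else 0)
    + (if q.2 + q.1 = p.2 + p.1 then 1 else 0)

-- total of pairContribB over all ordered pairs (earlier, later) of a list of entries
def bcount : List (Int × Int) → Int
  | [] => 0
  | p :: t => (t.map (fun q => pairContribB p q)).sum + bcount t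

-- generic "sum of c a b over all pairs a < b < m", recursing on the upper bound
def pairSum (c : Nat → Nat → Int) : Nat → Int
  | 0 => 0
  | m + 1 => pairSum c m + ((List.range m).map (fun a => c a m)).sum

lemma pairSum_congr (c c' : Nat → Nat → Int) (m : Nat)
    (h : ∀ a b : Nat, a < b → b < m → c a b = c' a b) :
    pairSum c m = pairSum c' m := by
  induction m with
  | zero => rfl
  | succ m ih =>
    simp only [pairSum]
    rw [ih (fun a b hab hb => h a b hab (by omega))]
    congr 1
    apply congrArg
    apply List.map_congr_left
    intro a ha
    exact h a m (List.mem_range.mp ha) (by omega)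

lemma bcount_append (t : List (Int × Int)) (x : Int × Int) :
    bcount (t ++ [x]) = bcount t + (t.map (fun p => pairContribB p x)).sum := by
  induction t with
  | nil => simp [bcount]
  | cons p t ih =>
    simp only [List.cons_append, bcount, List.map_append, List.sum_append,
      List.map_cons, List.sum_cons, List.sum_nil, List.map_nil, ih]
    ring

lemma sum_ite_eq_count {α : Type} (f : α → Int) (t : List α) (v : Int) :
    (t.map (fun p => if v = f p then (1:Int) else 0)).sum = ((t.map f).count v : Int) := by
  induction t with
  | nil => simp
  | cons p t ih =>
    simp only [List.map_cons, List.sum_cons, List.count_cons, ih, beq_iff_eq]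
    by_cases h : v = f p
    · simp [h, eq_comm]
      ring
    · simp [h, eq_comm]

-- the 0/1 sums bcount adds are the counts B reads from its three counters
lemma sum_pairContribB (t : List (Int × Int)) (x : Int × Int) :
    (t.map (fun p => pairContribB p x)).sum
      = ((t.map (fun p => p.2)).count x.2 : Int)
        + ((t.map (fun p => p.2 - p.1)).count (x.2 - x.1) : Int)
        + ((t.map (fun p => p.2 + p.1)).count (x.2 + x.1) : Int) := by
  simp only [pairContribB]
  rw [PySem.List.sum_map_add_int, PySem.List.sum_map_add_int]
  have h1 := sum_ite_eq_count (fun p : Int × Int => p.2) t x.2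
  have h2 := sum_ite_eq_count (fun p : Int × Int => p.2 - p.1) t (x.2 - x.1)
  have h3 := sum_ite_eq_count (fun p : Int × Int => p.2 + p.1) t (x.2 + x.1)
  simp only [] at h1 h2 h3
  rw [h1, h2, h3]

lemma counter_insert (m : List Int) (k : Int) :
    PySem.Dict.counter (m ++ [k])
      = (PySem.Dict.counter m).insert k ((PySem.Dict.counter m).getD k 0 + 1) := by
  rw [← PySem.Dict.foldl_insert_getD_add_one_eq_counter,
      ← PySem.Dict.foldl_insert_getD_add_one_eq_counter, List.foldl_append]
  simp

-- B's three dicts are counters of the three projections of the processed prefix,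
-- and its accumulator is bcount of that prefix
lemma foldB (t : List (Int × Int)) :
    t.foldl aptidaoAltStep (PySem.Dict.empty, PySem.Dict.empty, PySem.Dict.empty, 0)
      = (PySem.Dict.counter (t.map (fun p => p.2)),
         PySem.Dict.counter (t.map (fun p => p.2 - p.1)),
         PySem.Dict.counter (t.map (fun p => p.2 + p.1)),
         bcount t) := by
  induction t using List.reverseRecOn with
  | nil => rfl
  | append_singleton t x ih =>
    rw [List.foldl_append, ih]
    simp only [List.foldl_cons, List.foldl_nil, aptidaoAltStep, List.map_append,
      List.map_cons, List.map_nil]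
    rw [counter_insert, counter_insert, counter_insert, bcount_append, sum_pairContribB]
    simp only [PySem.Dict.getD_counter]
    ring_nf

lemma enumerate_map_eq (l : List Int) (x : Int × Int) :
    ((PySem.List.enumerate l 0).map (fun p => pairContribB p x)).sum
      = ((List.range l.length).map
          (fun (a : Nat) => pairContribB ((a : Int), l.getD a 0) x)).sum := by
  rw [PySem.List.enumerate_eq_map_pyRange (d := 0), PySem.List.pyRange_one]
  simp only [List.map_map, Function.comp_def]
  apply congrArg
  apply List.map_congr_left
  intro a _
  simp

-- B's total over the enumerated list is the generic pair sum of its contribution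
lemma bcount_enumerate (l : List Int) :
    bcount (PySem.List.enumerate l 0)
      = pairSum (fun a b => pairContribB ((a : Int), l.getD a 0) ((b : Int), l.getD b 0))
          l.length := by
  induction l using List.reverseRecOn with
  | nil => rfl
  | append_singleton l y ih =>
    rw [PySem.List.enumerate_append]
    simp only [PySem.List.enumerate_cons, PySem.List.enumerate_nil, zero_add]
    rw [bcount_append, ih, enumerate_map_eq]
    have hlen : (l ++ [y]).length = l.length + 1 := by simp
    rw [hlen]
    simp only [pairSum]
    congr 1
    · apply pairSum_congr
      intro a b hab hb
      have h1 : (l ++ [y]).getD a 0 = l.getD a 0 := by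
        rw [List.getD_append]; omega
      have h2 : (l ++ [y]).getD b 0 = l.getD b 0 := by
        rw [List.getD_append]; omega
      rw [h1, h2]
    · apply congrArg
      apply List.map_congr_left
      intro a ha
      have ha' := List.mem_range.mp ha
      have h1 : (l ++ [y]).getD a 0 = l.getD a 0 := by
        rw [List.getD_append]; omega
      have h2 : (l ++ [y]).getD l.length 0 = y := by
        simp [List.getD]
      rw [h1, h2]

-- A's nested ranges, summed, form the generic pair sum
lemma sumA (c : Nat → Nat → Int) (m : Nat) :
    ((List.range m).map (fun a =>
      ((List.range (m - (a + 1))).map (fun k => c a (a + 1 + k))).sum)).sum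
      = pairSum c m := by
  induction m with
  | zero => rfl
  | succ m ih =>
    rw [List.range_succ, List.map_append, List.sum_append]
    simp only [List.map_cons, List.map_nil, List.sum_cons, List.sum_nil]
    have hm : m + 1 - (m + 1) = 0 := by omega
    rw [hm]
    simp only [List.range_zero, List.map_nil, List.sum_nil, add_zero]
    have hsplit : ∀ a ∈ List.range m,
        ((List.range (m + 1 - (a + 1))).map (fun k => c a (a + 1 + k))).sum
          = ((List.range (m - (a + 1))).map (fun k => c a (a + 1 + k))).sum + c a m := by
      intro a ha
      have ha' := List.mem_range.mp ha
      have h1 : m + 1 - (a + 1) = (m - (a + 1)) + 1 := by omega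
      rw [h1, List.range_succ, List.map_append, List.sum_append]
      have h2 : a + 1 + (m - (a + 1)) = m := by omega
      simp [h2]
    rw [List.map_congr_left hsplit, PySem.List.sum_map_add_int, ih]
    simp [pairSum]

-- for distinct indices the two contribution shapes agree
lemma contrib_eq (a b v w : Int) (hab : a < b) :
    pairContribA a v b w = pairContribB (a, v) (b, w) := by
  simp only [pairContribA, pairContribB, abs_eq_abs]
  split_ifs <;> omega

-- A computes the generic pair sum over indices 0 … len-2
lemma aptidao_eq_pairSum (xs : List Int) :
    aptidao xs = pairSum
      (fun a b => pairContribA (a : Int) (xs.getD a 0) (b : Int) (xs.getD b 0))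
      (xs.length - 1) := by
  unfold aptidao
  simp only [PySem.List.len_eq]
  rw [PySem.List.foldl_congr_mem _ _
    (fun (colisoes : Int) (i : Int) =>
      (PySem.List.pyRange (i + 1) ((xs.length : Int) - 1) 1).foldl
        (fun colisoes j => colisoes +
          pairContribA i (PySem.List.pyGetD xs i 0) j (PySem.List.pyGetD xs j 0)) colisoes) _
    (by
      intro acc i _
      apply PySem.List.foldl_congr_mem
      intro acc' j _
      simp only [pairContribA]
      split_ifs <;> ring)]
  rw [PySem.List.foldl_congr_mem _ _
    (fun (colisoes : Int) (i : Int) => colisoes +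
      ((PySem.List.pyRange (i + 1) ((xs.length : Int) - 1) 1).map
        (fun j => pairContribA i (PySem.List.pyGetD xs i 0) j (PySem.List.pyGetD xs j 0))).sum) _
    (by
      intro acc i _
      exact PySem.List.foldl_add _ _ _)]
  rw [PySem.List.foldl_add, zero_add]
  rw [← sumA]
  rw [PySem.List.pyRange_one]
  have h0 : (((xs.length : Int) - 1) - 0).toNat = xs.length - 1 := by omega
  rw [h0, List.map_map]
  apply congrArg
  apply List.map_congr_left
  intro a ha
  have ham : a < xs.length - 1 := by
    have := List.mem_range.mp ha; omega
  simp only [Function.comp_def, zero_add]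
  rw [PySem.List.pyRange_one, List.map_map]
  have hbound : (((xs.length : Int) - 1) - ((a : Int) + 1)).toNat = xs.length - 1 - (a + 1) := by
    omega
  rw [hbound]
  apply congrArg
  apply List.map_congr_left
  intro k hk
  have hkm := List.mem_range.mp hk
  simp only [Function.comp_def]
  have hcast : (a : Int) + 1 + (k : Int) = ((a + 1 + k : Nat) : Int) := by push_cast; ring
  rw [hcast, PySem.List.pyGetD_natCast, PySem.List.pyGetD_natCast]

lemma getD_dropLast (xs : List Int) (n : Nat) (h : n < xs.length - 1) :
    xs.dropLast.getD n 0 = xs.getD n 0 := by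
  have hlen : n < xs.dropLast.length := by simp [List.length_dropLast]; omega
  have hlen' : n < xs.length := by omega
  rw [List.getD_eq_getElem _ _ hlen, List.getD_eq_getElem _ _ hlen', List.getElem_dropLast]

theorem aptidao_eq_alt (xs : List Int) : aptidao xs = aptidao_alt xs := by
  rw [aptidao_eq_pairSum]
  unfold aptidao_alt
  rw [PySem.List.slice_to_neg_one, foldB, bcount_enumerate, List.length_dropLast]
  apply pairSum_congr
  intro a b hab hb
  rw [getD_dropLast xs a (by omega), getD_dropLast xs b hb]
  exact contrib_eq _ _ _ _ (by exact_mod_cast hab)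

-- ===== VERDICT (by name: the statement is the Claim_ definition above) =====
theorem aptidao_spec : Claim_equal_aptidao := by
  intro xs _
  unfold Spec_aptidao
  exact aptidao_eq_alt xs
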